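-- pv_equiv track=rewrite | github.com/etan630/Onions-Leetcode-Solutions | Mock CCC '20 Contest 1 J2 - A Simplex Problem.py | simplex
-- ===== SOURCE A (Python) =====
-- def simplex(uc, um, k):
--     max_joy = 0
--     curr_joy = 0
--
--     for i in range(k + 1):
--         for j in range(k + 1):
--             if i + j <= k:
--                 curr_joy = i * uc + j * um # calc curr joy
--
--                 if (curr_joy > max_joy):
--                     max_joy = curr_joy # update if curr is higher
--
--     return max_joy
-- ===== SOURCE B (Python) =====
-- def simplex(uc, um, k):
--     if k < 0:
--         return 0
--     return max(0, k * uc, k * um)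
-- ===== Notes on version B (the rewrite author's own statement) =====
-- stated objective: faster
-- what changed: Replaced the O(k^2) double loop over all (i,j) with the closed form max(0, k*uc, k*um): the linear objective over the simplex i+j<=k is maximised at a vertex.
import Mathlib
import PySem

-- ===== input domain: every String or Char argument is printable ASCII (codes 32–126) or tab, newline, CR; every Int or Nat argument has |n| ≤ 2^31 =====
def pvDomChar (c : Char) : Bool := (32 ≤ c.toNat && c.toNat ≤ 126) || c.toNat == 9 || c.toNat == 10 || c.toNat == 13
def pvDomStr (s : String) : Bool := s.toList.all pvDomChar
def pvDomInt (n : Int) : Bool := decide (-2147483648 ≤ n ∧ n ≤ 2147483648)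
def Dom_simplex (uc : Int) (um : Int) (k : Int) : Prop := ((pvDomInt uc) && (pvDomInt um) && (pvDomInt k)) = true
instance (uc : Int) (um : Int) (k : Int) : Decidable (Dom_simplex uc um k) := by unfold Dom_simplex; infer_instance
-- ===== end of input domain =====

-- B replaces A's O(k^2) double loop by the closed form max(0, k*uc, k*um) (vertex of the simplex).

-- ===== PORT A =====
-- state = (max_joy, curr_joy), exactly as in the Python
def simplex (uc : Int) (um : Int) (k : Int) : Int :=
  ((PySem.List.pyRange 0 (k + 1) 1).foldl (fun (m : Int × Int) i =>
    (PySem.List.pyRange 0 (k + 1) 1).foldl (fun (m : Int × Int) j =>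
      if i + j ≤ k then
        let c := i * uc + j * um
        (if c > m.1 then c else m.1, c)
      else m) m) ((0 : Int), (0 : Int))).1

-- ===== PORT B =====
def simplex_alt (uc : Int) (um : Int) (k : Int) : Int :=
  if k < 0 then 0 else max (max 0 (k * uc)) (k * um)

-- ===== PRECONDITION & SPEC =====
def Spec_simplex (uc : Int) (um : Int) (k : Int) (out : Int) : Prop := out = simplex_alt uc um k
instance (uc : Int) (um : Int) (k : Int) (out : Int) : Decidable (Spec_simplex uc um k out) := by unfold Spec_simplex; infer_instance

-- ===== CLAIM (what is proved, stated in full; the proofs are below) =====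
def Claim_equal_simplex : Prop := ∀ (uc : Int) (um : Int) (k : Int), Dom_simplex uc um k → Spec_simplex uc um k (simplex uc um k)

-- ===== LEMMAS AND PROOFS =====

-- the pair fold's first component is a fold on the first component alone
theorem pv_foldl_fst {g : Int × Int → Int → Int × Int} {h : Int → Int → Int}
    (hg : ∀ m x, (g m x).1 = h m.1 x) :
    ∀ (L : List Int) (m : Int × Int), (L.foldl g m).1 = L.foldl h m.1 := by
  intro L
  induction L with
  | nil => intro m; rfl
  | cons x xs ih => intro m; rw [List.foldl_cons, List.foldl_cons, ih, hg]

theorem pv_le_foldl_of_mono (s : Int → Int → Int) (hm : ∀ a x, a ≤ s a x) :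
    ∀ (L : List Int) (a : Int), a ≤ L.foldl s a := by
  intro L
  induction L with
  | nil => intro a; exact le_refl a
  | cons x xs ih => intro a; exact le_trans (hm a x) (ih (s a x))

theorem pv_le_foldl_of_mem (s : Int → Int → Int) (hm : ∀ a x, a ≤ s a x) :
    ∀ (L : List Int) (a x X : Int), x ∈ L → (∀ a', X ≤ s a' x) → X ≤ L.foldl s a := by
  intro L
  induction L with
  | nil => intro a x X hx; cases hx
  | cons y ys ih =>
      intro a x X hx hX
      rcases List.mem_cons.mp hx with h | h
      · subst h
        exact le_trans (hX a) (pv_le_foldl_of_mono s hm ys (s a x))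
      · exact ih (s a y) x X h hX

theorem pv_foldl_le (s : Int → Int → Int) :
    ∀ (L : List Int) (a B : Int), a ≤ B → (∀ a' x, x ∈ L → a' ≤ B → s a' x ≤ B) →
      L.foldl s a ≤ B := by
  intro L
  induction L with
  | nil => intro a B ha _; exact ha
  | cons x xs ih =>
      intro a B ha hs
      exact ih (s a x) B (hs a x (List.mem_cons_self) ha)
        (fun a' y hy => hs a' y (List.mem_cons_of_mem x hy))

-- a linear form on the integer simplex i+j ≤ k, i,j ≥ 0 is bounded by its vertex values
theorem pv_simplex_bound (uc um k i j : Int) (hi : 0 ≤ i) (hj : 0 ≤ j) (hij : i + j ≤ k) :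
    i * uc + j * um ≤ max (max 0 (k * uc)) (k * um) := by
  set M := max (max 0 (k * uc)) (k * um) with hM
  have h0 : (0 : Int) ≤ M := le_trans (le_max_left 0 (k * uc)) (le_max_left _ _)
  have h1 : k * uc ≤ M := le_trans (le_max_right 0 (k * uc)) (le_max_left _ _)
  have h2 : k * um ≤ M := le_max_right _ _
  rcases lt_or_ge 0 k with hk | hk
  · have key : k * (i * uc + j * um) ≤ k * M := by nlinarith
    exact le_of_mul_le_mul_left key hk
  · have hi0 : i = 0 := by omega
    have hj0 : j = 0 := by omega
    subst hi0; subst hj0; simpa using h0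

theorem pv_inner_mono (uc um k i : Int) :
    ∀ (a j : Int), a ≤ (if i + j ≤ k then (if i * uc + j * um > a then i * uc + j * um else a) else a) := by
  intro a j; split_ifs <;> omega

theorem pv_outer_step_mono (uc um k : Int) :
    ∀ (a i : Int), a ≤ (PySem.List.pyRange 0 (k + 1) 1).foldl
      (fun a j => if i + j ≤ k then (if i * uc + j * um > a then i * uc + j * um else a) else a) a := by
  intro a i
  exact pv_le_foldl_of_mono _ (fun a j => pv_inner_mono uc um k i a j) _ a

-- ===== VERDICT (by name: the statement is the Claim_ definition above) =====
theorem simplex_spec : Claim_equal_simplex := by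
  intro uc um k _
  unfold Spec_simplex simplex simplex_alt
  have hfst := pv_foldl_fst
    (g := fun (m : Int × Int) i =>
      (PySem.List.pyRange 0 (k + 1) 1).foldl (fun (m : Int × Int) j =>
        if i + j ≤ k then
          let c := i * uc + j * um
          (if c > m.1 then c else m.1, c)
        else m) m)
    (h := fun a i => (PySem.List.pyRange 0 (k + 1) 1).foldl
        (fun a j => if i + j ≤ k then (if i * uc + j * um > a then i * uc + j * um else a) else a) a)
    (by
      intro m i
      exact pv_foldl_fst
        (g := fun (m : Int × Int) j =>
          if i + j ≤ k then
            let c := i * uc + j * um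
            (if c > m.1 then c else m.1, c)
          else m)
        (h := fun a j => if i + j ≤ k then (if i * uc + j * um > a then i * uc + j * um else a) else a)
        (by intro m j; dsimp only; split_ifs <;> rfl) _ m)
    (PySem.List.pyRange 0 (k + 1) 1) ((0 : Int), (0 : Int))
  rw [hfst]
  by_cases hk : k < 0
  · rw [PySem.List.pyRange_one_eq_nil (by omega)]
    simp [hk]
  · rw [not_lt] at hk
    simp only [if_neg (not_lt.mpr hk)]
    set M := max (max 0 (k * uc)) (k * um) with hM
    have hmemk : k ∈ PySem.List.pyRange 0 (k + 1) 1 := by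
      rw [PySem.List.mem_pyRange_one]; omega
    have hmem0 : (0 : Int) ∈ PySem.List.pyRange 0 (k + 1) 1 := by
      rw [PySem.List.mem_pyRange_one]; omega
    apply le_antisymm
    · -- upper bound
      apply pv_foldl_le _ _ _ M
      · exact le_trans (le_max_left 0 (k * uc)) (le_max_left _ _)
      · intro a i hi ha
        apply pv_foldl_le _ _ _ M ha
        intro a' j hj ha'
        have hi' := (PySem.List.mem_pyRange_one.mp hi).1
        have hj' := (PySem.List.mem_pyRange_one.mp hj).1
        split_ifs with h1 h2
        · exact pv_simplex_bound uc um k i j hi' hj' h1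
        · exact ha'
        · exact ha'
    · -- lower bound: M = max of three attained values
      set S : Int → Int → Int := fun a i => (PySem.List.pyRange 0 (k + 1) 1).foldl
        (fun a j => if i + j ≤ k then (if i * uc + j * um > a then i * uc + j * um else a) else a) a with hS
      have hz : (0 : Int) ≤ (PySem.List.pyRange 0 (k + 1) 1).foldl S 0 :=
        pv_le_foldl_of_mono _ (pv_outer_step_mono uc um k) _ 0
      have huc : k * uc ≤ (PySem.List.pyRange 0 (k + 1) 1).foldl S 0 := by
        apply pv_le_foldl_of_mem _ (pv_outer_step_mono uc um k) _ 0 k (k * uc) hmemk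
        intro a'
        apply pv_le_foldl_of_mem _ (fun a j => pv_inner_mono uc um k k a j) _ a' 0 (k * uc) hmem0
        intro a''
        have : k + (0 : Int) ≤ k := by omega
        simp only [add_zero]
        split_ifs <;> omega
      have hum : k * um ≤ (PySem.List.pyRange 0 (k + 1) 1).foldl S 0 := by
        apply pv_le_foldl_of_mem _ (pv_outer_step_mono uc um k) _ 0 0 (k * um) hmem0
        intro a'
        apply pv_le_foldl_of_mem _ (fun a j => pv_inner_mono uc um k 0 a j) _ a' k (k * um) hmemk
        intro a''
        have : (0 : Int) + k ≤ k := by omega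
        simp only [zero_add]
        split_ifs <;> omega
      exact max_le (max_le hz huc) hum
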